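-- pv_equiv track=rewrite | github.com/sam121/sg-kids-culture | scripts/sources/common.py | summarize_age_ranges
-- ===== SOURCE A (Python) =====
-- from typing import List, Optional
--
-- def summarize_age_ranges(
--     ranges: List[tuple[Optional[int], Optional[int]]],
-- ) -> tuple[Optional[int], Optional[int]]:
--     if not ranges:
--         return None, None
--     mins = [lo for lo, _ in ranges if lo is not None]
--     maxes = [hi for _, hi in ranges if hi is not None]
--     age_min = min(mins) if mins else None
--     age_max = None if any(hi is None for _, hi in ranges) else (max(maxes) if maxes else None)
--     return age_min, age_max
-- ===== SOURCE B (Python) =====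
-- from typing import List, Optional
--
-- def summarize_age_ranges(
--     ranges: List[tuple[Optional[int], Optional[int]]],
-- ) -> tuple[Optional[int], Optional[int]]:
--     if not ranges:
--         return None, None
--     lo_min = None
--     hi_max = None
--     open_top = False
--     for lo, hi in ranges:
--         if lo is not None and (lo_min is None or lo < lo_min):
--             lo_min = lo
--         if hi is None:
--             open_top = True
--         elif hi_max is None or hi > hi_max:
--             hi_max = hi
--     return lo_min, (None if open_top else hi_max)
-- ===== Notes on version B (the rewrite author's own statement) =====
-- stated objective: alternative
-- what changed: Replaces the two intermediate comprehension lists plus a separate any() scan and min()/max() calls with a single explicit pass maintaining a running min, running max and an open-top flag, allocating no intermediate lists.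
import Mathlib
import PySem

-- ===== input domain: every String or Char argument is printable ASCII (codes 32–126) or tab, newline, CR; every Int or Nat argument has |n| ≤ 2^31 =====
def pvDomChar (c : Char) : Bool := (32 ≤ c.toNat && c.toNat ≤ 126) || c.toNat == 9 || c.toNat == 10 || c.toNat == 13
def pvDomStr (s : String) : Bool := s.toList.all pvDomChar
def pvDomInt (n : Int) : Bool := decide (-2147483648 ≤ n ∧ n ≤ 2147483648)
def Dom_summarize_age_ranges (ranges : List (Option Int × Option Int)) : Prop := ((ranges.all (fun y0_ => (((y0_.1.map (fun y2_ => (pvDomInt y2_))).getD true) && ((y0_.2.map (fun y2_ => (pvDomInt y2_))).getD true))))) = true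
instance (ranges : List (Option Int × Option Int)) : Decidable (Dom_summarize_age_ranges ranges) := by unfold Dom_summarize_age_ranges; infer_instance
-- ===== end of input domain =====

-- B replaces A's two intermediate lists and three scans (mins, maxes, any-None) by one
-- explicit pass keeping a running min, a running max and an open-top flag (objective: alternative).

-- ===== PORT A =====
def summarize_age_ranges (ranges : List (Option Int × Option Int)) : Option Int × Option Int :=
  if ranges = [] then (none, none)
  else
    let mins := ranges.filterMap (fun p => p.1)
    let maxes := ranges.filterMap (fun p => p.2)
    let age_min := if mins ≠ [] then PySem.List.min? mins (fun x => x) else none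
    let age_max := if ranges.any (fun p => p.2 = none) then none
                   else if maxes ≠ [] then PySem.List.max? maxes (fun x => x) else none
    (age_min, age_max)

-- ===== PORT B =====
-- the for-loop of Source B, state = (lo_min, hi_max, open_top)
def altLoop : List (Option Int × Option Int) → Option Int → Option Int → Bool →
    Option Int × Option Int × Bool
  | [], lm, hm, ot => (lm, hm, ot)
  | (lo, hi) :: t, lm, hm, ot =>
    let lm' := match lo, lm with
      | some l, none => some l
      | some l, some m => if l < m then some l else some m
      | none, m => m
    match hi with
    | none => altLoop t lm' hm true
    | some h =>
      let hm' := match hm with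
        | none => some h
        | some m => if h > m then some h else some m
      altLoop t lm' hm' ot

def summarize_age_ranges_alt (ranges : List (Option Int × Option Int)) : Option Int × Option Int :=
  if ranges = [] then (none, none)
  else
    let (lm, hm, ot) := altLoop ranges none none false
    (lm, if ot then none else hm)

-- ===== PRECONDITION & SPEC =====
def Spec_summarize_age_ranges (ranges : List (Option Int × Option Int)) (out : Option Int × Option Int) : Prop := out = summarize_age_ranges_alt ranges
instance (ranges : List (Option Int × Option Int)) (out : Option Int × Option Int) : Decidable (Spec_summarize_age_ranges ranges out) := by unfold Spec_summarize_age_ranges; infer_instance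

-- ===== CLAIM (what is proved, stated in full; the proofs are below) =====
def Claim_equal_summarize_age_ranges : Prop := ∀ (ranges : List (Option Int × Option Int)), Dom_summarize_age_ranges ranges → Spec_summarize_age_ranges ranges (summarize_age_ranges ranges)

-- ===== LEMMAS AND PROOFS =====

lemma if_some_min (l m : Int) : (if l < m then (some l : Option Int) else some m) = some (min l m) := by
  split_ifs <;> congr 1 <;> omega

lemma if_some_max (h m : Int) : (if h > m then (some h : Option Int) else some m) = some (max h m) := by
  split_ifs <;> congr 1 <;> omega

-- running-min / running-max step on an optional accumulator
def omin (a : Option Int) (l : Int) : Option Int :=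
  match a with | none => some l | some m => some (min l m)
def omax (a : Option Int) (h : Int) : Option Int :=
  match a with | none => some h | some m => some (max h m)

lemma altLoop_eq (t : List (Option Int × Option Int)) :
    ∀ (lm hm : Option Int) (ot : Bool),
    altLoop t lm hm ot =
      ((t.filterMap (fun p => p.1)).foldl omin lm,
       (t.filterMap (fun p => p.2)).foldl omax hm,
       ot || t.any (fun p => p.2 = none)) := by
  induction t with
  | nil => intro lm hm ot; simp [altLoop]
  | cons x t ih =>
    intro lm hm ot
    obtain ⟨lo, hi⟩ := x
    cases lo <;> cases hi <;> cases lm <;> cases hm <;>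
      simp [altLoop, ih, omin, omax, if_some_min, if_some_max]

lemma foldl_omin_some (ys : List Int) : ∀ m : Int,
    ys.foldl omin (some m) = some (ys.foldl min m) := by
  induction ys with
  | nil => intro m; rfl
  | cons y t ih => intro m; simp [omin, ih, min_comm]

lemma foldl_omin_eq_min? (ys : List Int) :
    ys.foldl omin none = PySem.List.min? ys (fun x => x) := by
  cases ys with
  | nil => simp [PySem.List.min?]
  | cons y t =>
    rw [PySem.List.min?_id_cons]
    simpa [omin] using foldl_omin_some t y

lemma foldl_omax_some (ys : List Int) : ∀ m : Int,
    ys.foldl omax (some m) = some (ys.foldl max m) := by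
  induction ys with
  | nil => intro m; rfl
  | cons y t ih => intro m; simp [omax, ih, max_comm]

lemma foldl_omax_eq_max? (ys : List Int) :
    ys.foldl omax none = PySem.List.max? ys (fun x => x) := by
  cases ys with
  | nil => simp [PySem.List.max?]
  | cons y t =>
    rw [PySem.List.max?_id_cons]
    simpa [omax] using foldl_omax_some t y

-- ===== VERDICT (by name: the statement is the Claim_ definition above) =====
theorem summarize_age_ranges_spec : Claim_equal_summarize_age_ranges := by
  intro ranges _
  unfold Spec_summarize_age_ranges summarize_age_ranges summarize_age_ranges_alt
  by_cases h : ranges = []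
  · simp [h]
  · simp only [h, if_false]
    rw [altLoop_eq]
    simp only [foldl_omin_eq_min?, foldl_omax_eq_max?, Bool.false_or]
    refine Prod.ext ?_ ?_ <;> simp only
    · by_cases hm : ranges.filterMap (fun p => p.1) = [] <;>
        simp [hm, PySem.List.min?]
    · by_cases ha : ranges.any (fun p => p.2 = none)
      · simp [ha]
      · by_cases hx : ranges.filterMap (fun p => p.2) = [] <;>
          simp [ha, hx, PySem.List.max?]
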